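-- pv_equiv track=rewrite | github.com/liujuanjuan1984/lifeos-cli | src/lifeos_cli/i18n.py | _locale_candidates
-- ===== SOURCE A (Python) =====
-- DEFAULT_LOCALE = "en"
--
-- def _normalize_locale_tag(locale_tag: str) -> str:
--     """Convert a BCP-47-like tag into the locale directory naming convention."""
--     return locale_tag.strip().replace("-", "_")
--
-- def _locale_candidates(locale_tag: str) -> list[str]:
--     """Return locale lookup candidates from most specific to least specific."""
--     normalized = _normalize_locale_tag(locale_tag)
--     parts = [part for part in normalized.split("_") if part]
--     if not parts:
--         return [DEFAULT_LOCALE]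
--     candidates = ["_".join(parts[: index + 1]) for index in range(len(parts))]
--     candidates.reverse()
--     if DEFAULT_LOCALE not in candidates:
--         candidates.append(DEFAULT_LOCALE)
--     return candidates
-- ===== SOURCE B (Python) =====
-- DEFAULT_LOCALE = "en"
--
--
-- def _locale_candidates(locale_tag: str) -> list[str]:
--     """Peel trailing segments off the full normalized tag instead of building prefixes."""
--     normalized = locale_tag.strip().replace("-", "_")
--     parts = [part for part in normalized.split("_") if part]
--     if not parts:
--         return [DEFAULT_LOCALE]
--     candidates = []
--     current = "_".join(parts)
--     while current:
--         candidates.append(current)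
--         current = current.rpartition("_")[0]
--     if DEFAULT_LOCALE not in candidates:
--         candidates.append(DEFAULT_LOCALE)
--     return candidates
-- ===== Notes on version B (the rewrite author's own statement) =====
-- stated objective: alternative
-- what changed: B builds the candidate list by repeatedly peeling the trailing '_'-segment off the full joined tag with a rpartition loop on one shrinking string, instead of constructing every prefix slice independently over range(len(parts)) and reversing the list.
import Mathlib
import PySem

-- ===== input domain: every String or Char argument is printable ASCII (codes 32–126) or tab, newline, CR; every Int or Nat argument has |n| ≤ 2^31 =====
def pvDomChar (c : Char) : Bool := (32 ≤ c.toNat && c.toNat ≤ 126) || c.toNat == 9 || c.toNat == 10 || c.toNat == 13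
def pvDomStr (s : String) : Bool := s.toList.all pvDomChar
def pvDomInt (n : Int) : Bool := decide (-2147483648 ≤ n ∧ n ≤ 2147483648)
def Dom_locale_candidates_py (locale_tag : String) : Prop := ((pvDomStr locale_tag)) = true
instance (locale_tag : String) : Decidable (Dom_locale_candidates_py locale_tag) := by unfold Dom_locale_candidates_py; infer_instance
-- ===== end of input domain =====

-- B builds the candidate list by repeatedly peeling the trailing '_'-segment off the full joined
-- tag (a rpartition loop on one shrinking string) instead of constructing each prefix slice
-- independently and reversing; objective: alternative decomposition, same cost.

-- ===== PORT A =====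
def locale_candidates_py (locale_tag : String) : List String :=
  let normalized := PySem.Chars.replace (PySem.Chars.strip locale_tag.toList) ['-'] ['_']
  let parts := (PySem.Chars.splitOn normalized ['_']).filter (fun part => part ≠ [])
  if parts = [] then ["en"]
  else
    let candidates := (PySem.List.pyRange 0 (parts.length : Int) 1).map
      (fun index => String.ofList (PySem.Chars.join ['_'] (PySem.List.slice parts none (some (index + 1)))))
    let candidates := candidates.reverse
    if "en" ∈ candidates then candidates else candidates ++ ["en"]

-- ===== PORT B =====
-- exact port of cur.rpartition("_")[0] for the single-char separator "_":
-- everything strictly before the LAST '_' ("" when '_' does not occur)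
def pvRpartBefore (cs : List Char) : List Char :=
  ((cs.reverse.dropWhile (fun c => c ≠ '_')).drop 1).reverse

-- the `while current:` loop of B: collect current, then truncate at the last '_'
-- (fuel only makes the recursion structural; `current` strictly shrinks, so
-- `length + 1` fuel at the call site is always enough)
def pvPeel (fuel : Nat) (cur : List Char) : List (List Char) :=
  match fuel with
  | 0 => []
  | fuel + 1 => if cur = [] then [] else cur :: pvPeel fuel (pvRpartBefore cur)

def locale_candidates_py_alt (locale_tag : String) : List String :=
  let normalized := PySem.Chars.replace (PySem.Chars.strip locale_tag.toList) ['-'] ['_']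
  let parts := (PySem.Chars.splitOn normalized ['_']).filter (fun part => part ≠ [])
  if parts = [] then ["en"]
  else
    let joined := PySem.Chars.join ['_'] parts
    let candidates := (pvPeel (joined.length + 1) joined).map String.ofList
    if "en" ∈ candidates then candidates else candidates ++ ["en"]

-- ===== PRECONDITION & SPEC =====
def Spec_locale_candidates_py (locale_tag : String) (out : List String) : Prop := out = locale_candidates_py_alt locale_tag
instance (locale_tag : String) (out : List String) : Decidable (Spec_locale_candidates_py locale_tag out) := by unfold Spec_locale_candidates_py; infer_instance

-- ===== CLAIM (what is proved, stated in full; the proofs are below) =====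
def Claim_equal_locale_candidates_py : Prop := ∀ (locale_tag : String), Dom_locale_candidates_py locale_tag → Spec_locale_candidates_py locale_tag (locale_candidates_py locale_tag)

-- ===== LEMMAS AND PROOFS =====

-- every piece produced by split("_") is free of '_'
theorem splitOn_go_no_sep (fuel : Nat) : ∀ (l cur : List Char) (acc : List (List Char)),
    l.length ≤ fuel → '_' ∉ cur → (∀ p ∈ acc, '_' ∉ p) →
    ∀ p ∈ PySem.Chars.splitOn.go ['_'] fuel l cur acc, '_' ∉ p := by
  induction fuel with
  | zero =>
    intro l cur acc hl hcur hacc p hp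
    have hl0 : l = [] := List.eq_nil_of_length_eq_zero (Nat.le_zero.mp hl)
    subst hl0
    rw [PySem.Chars.splitOn.go.eq_def] at hp
    simp only [List.mem_reverse, List.mem_cons, List.append_nil] at hp
    rcases hp with h | h
    · subst h; simpa using hcur
    · exact hacc p h
  | succ fuel ih =>
    intro l cur acc hl hcur hacc p hp
    cases l with
    | nil =>
      rw [PySem.Chars.splitOn.go.eq_def] at hp
      simp only [List.mem_reverse, List.mem_cons] at hp
      rcases hp with h | h
      · subst h; simpa using hcur
      · exact hacc p h
    | cons c rest =>
      rw [PySem.Chars.splitOn.go.eq_def] at hp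
      by_cases hpre : ['_'].isPrefixOf (c :: rest) = true
      · simp only [hpre, if_true] at hp
        refine ih _ [] _ (by simpa using hl) (by simp) ?_ p hp
        intro q hq
        rcases List.mem_cons.mp hq with h | h
        · subst h; simpa using hcur
        · exact hacc q h
      · simp only [hpre, if_false, Bool.false_eq_true] at hp
        have hc : c ≠ '_' := by
          intro h; subst h
          simp [List.isPrefixOf] at hpre
        refine ih rest (c :: cur) acc (by simpa using Nat.le_of_succ_le_succ (by simpa using hl)) ?_ hacc p hp
        intro hmem
        rcases List.mem_cons.mp hmem with h | h
        · exact hc h.symm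
        · exact hcur h

theorem splitOn_no_sep (cs : List Char) : ∀ p ∈ PySem.Chars.splitOn cs ['_'], '_' ∉ p := by
  unfold PySem.Chars.splitOn
  exact splitOn_go_no_sep (cs.length + 1) cs [] [] (by omega) (by simp) (by simp)

theorem join_concat (ps : List (List Char)) (p : List Char) (h : ps ≠ []) :
    PySem.Chars.join ['_'] (ps ++ [p]) = PySem.Chars.join ['_'] ps ++ '_' :: p := by
  induction ps with
  | nil => cases h rfl
  | cons q qs ih =>
    cases qs with
    | nil =>
      simp [PySem.Chars.join_cons_cons, PySem.Chars.join_singleton]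
    | cons r rs =>
      have hstep : (q :: r :: rs) ++ [p] = q :: ((r :: rs) ++ [p]) := by simp
      rw [hstep]
      have hcons : (r :: rs) ++ [p] = r :: (rs ++ [p]) := by simp
      rw [hcons, PySem.Chars.join_cons_cons, ← hcons, ih (by simp), PySem.Chars.join_cons_cons]
      simp

theorem dropWhile_all_ne (p : List Char) (hp : '_' ∉ p) :
    p.reverse.dropWhile (fun c => c ≠ '_') = [] := by
  rw [List.dropWhile_eq_nil_iff]
  intro x hx
  simp only [List.mem_reverse] at hx
  simp only [decide_eq_true_eq]
  intro h
  exact hp (h ▸ hx)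

theorem rpart_no_sep (p : List Char) (hp : '_' ∉ p) : pvRpartBefore p = [] := by
  unfold pvRpartBefore
  rw [dropWhile_all_ne p hp]
  simp

theorem rpart_concat (xs p : List Char) (hp : '_' ∉ p) :
    pvRpartBefore (xs ++ '_' :: p) = xs := by
  unfold pvRpartBefore
  rw [List.reverse_append, List.reverse_cons, List.append_assoc, List.dropWhile_append,
      dropWhile_all_ne p hp]
  simp

theorem pvPeel_nil (fuel : Nat) : pvPeel fuel [] = [] := by
  cases fuel <;> simp [pvPeel]

theorem peel_join (parts : List (List Char)) :
    ∀ fuel : Nat, (∀ p ∈ parts, p ≠ []) → (∀ p ∈ parts, '_' ∉ p) → parts ≠ [] →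
    (PySem.Chars.join ['_'] parts).length < fuel →
    pvPeel fuel (PySem.Chars.join ['_'] parts)
      = ((List.range parts.length).map (fun i => PySem.Chars.join ['_'] (parts.take (i + 1)))).reverse := by
  induction parts using List.reverseRecOn with
  | nil => intro _ _ _ h _; cases h rfl
  | append_singleton ps p ih =>
    intro fuel hne hfree _ hfuel
    have hpne : p ≠ [] := hne p (by simp)
    have hpfree : '_' ∉ p := hfree p (by simp)
    by_cases hps : ps = []
    · subst hps
      simp only [List.nil_append] at hfuel ⊢
      rw [PySem.Chars.join_singleton] at hfuel ⊢
      cases fuel with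
      | zero => omega
      | succ f =>
        simp only [pvPeel]
        rw [if_neg hpne, rpart_no_sep p hpfree, pvPeel_nil]
        simp [PySem.Chars.join_singleton, List.range_succ]
    · rw [join_concat ps p hps] at hfuel ⊢
      cases fuel with
      | zero => omega
      | succ f =>
        have hjoin_ne : PySem.Chars.join ['_'] ps ++ '_' :: p ≠ [] := by simp
        simp only [pvPeel]
        rw [if_neg hjoin_ne, rpart_concat _ p hpfree]
        have hlt : (PySem.Chars.join ['_'] ps).length < f := by
          simp only [List.length_append, List.length_cons] at hfuel
          omega
        rw [ih f (fun q hq => hne q (by simp [hq])) (fun q hq => hfree q (by simp [hq])) hps hlt]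
        have hlen : (ps ++ [p]).length = ps.length + 1 := by simp
        rw [hlen, List.range_succ, List.map_append]
        have hmapeq : (List.range ps.length).map (fun i => PySem.Chars.join ['_'] ((ps ++ [p]).take (i + 1)))
            = (List.range ps.length).map (fun i => PySem.Chars.join ['_'] (ps.take (i + 1))) := by
          apply List.map_congr_left
          intro i hi
          rw [List.take_append_of_le_length (by simp only [List.mem_range] at hi; omega)]
        rw [hmapeq]
        have htake : (ps ++ [p]).take (ps.length + 1) = ps ++ [p] := by
          rw [← hlen]; exact List.take_length
        simp [htake, join_concat ps p hps, List.reverse_append]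

theorem pyRange_zero_eq (n : Nat) :
    PySem.List.pyRange 0 (n : Int) 1 = List.map Int.ofNat (List.range n) := by
  rcases Nat.eq_zero_or_pos n with h | h
  · subst h; simp [PySem.List.pyRange]
  · simp [PySem.List.pyRange, h]

theorem A_cands (parts : List (List Char)) :
    (PySem.List.pyRange 0 (parts.length : Int) 1).map
        (fun index => String.ofList (PySem.Chars.join ['_'] (PySem.List.slice parts none (some (index + 1)))))
      = (List.range parts.length).map (fun i => String.ofList (PySem.Chars.join ['_'] (parts.take (i + 1)))) := by
  rw [pyRange_zero_eq, List.map_map]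
  apply List.map_congr_left
  intro i hi
  simp only [Function.comp_apply]
  have hcast : (Int.ofNat i + 1) = ((i + 1 : Nat) : Int) := by
    simp
  rw [hcast, PySem.List.slice_to parts (by positivity), Int.toNat_natCast]

theorem branch_eq (parts : List (List Char))
    (hfree : ∀ p ∈ parts, '_' ∉ p) (hne : ∀ p ∈ parts, p ≠ []) :
    (if parts = [] then ["en"]
     else
       let candidates := ((PySem.List.pyRange 0 (parts.length : Int) 1).map
         (fun index => String.ofList (PySem.Chars.join ['_'] (PySem.List.slice parts none (some (index + 1)))))).reverse
       if "en" ∈ candidates then candidates else candidates ++ ["en"])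
    = (if parts = [] then ["en"]
       else
         let candidates := (pvPeel ((PySem.Chars.join ['_'] parts).length + 1) (PySem.Chars.join ['_'] parts)).map String.ofList
         if "en" ∈ candidates then candidates else candidates ++ ["en"]) := by
  by_cases hp : parts = []
  · subst hp; simp
  · rw [if_neg hp, if_neg hp]
    have hc : ((PySem.List.pyRange 0 (parts.length : Int) 1).map
        (fun index => String.ofList (PySem.Chars.join ['_'] (PySem.List.slice parts none (some (index + 1)))))).reverse
        = (pvPeel ((PySem.Chars.join ['_'] parts).length + 1) (PySem.Chars.join ['_'] parts)).map String.ofList := by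
      rw [A_cands, peel_join parts _ hne hfree hp (by omega), List.map_reverse, List.map_map]
      rfl
    simp only [hc]

-- ===== VERDICT (by name: the statement is the Claim_ definition above) =====
theorem locale_candidates_py_spec : Claim_equal_locale_candidates_py := by
  intro s _
  unfold Spec_locale_candidates_py locale_candidates_py locale_candidates_py_alt
  refine branch_eq _ ?_ ?_
  · intro p hmem
    exact splitOn_no_sep _ p (List.mem_filter.mp hmem).1
  · intro p hmem
    exact of_decide_eq_true (List.mem_filter.mp hmem).2
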